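-- pv_equiv track=rewrite | github.com/arg-tech/decisionmaking_alternative_components | llm_eval_metrics.py | calc_upvote_weighted_intersection
-- ===== SOURCE A (Python) =====
-- def calc_upvote_weighted_intersection(
--                                       target_components_upvote_scores,
--                                       target_components,
--                                       matched_target_components
--                                       ):
--
--     score = 0
--     for target_comp_upvote_val, target_comp in zip(
--             target_components_upvote_scores, target_components
--     ):
--         if target_comp in matched_target_components:
--             score += target_comp_upvote_val
--     return score
-- ===== SOURCE B (Python) =====
-- def calc_upvote_weighted_intersection(
--                                       target_components_upvote_scores,
--                                       target_components,
--                                       matched_target_components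
--                                       ):
--     index = {}
--     for score, comp in zip(target_components_upvote_scores, target_components):
--         index[comp] = index.get(comp, 0) + score
--     total = 0
--     for comp in set(matched_target_components):
--         total += index.get(comp, 0)
--     return total
-- ===== Notes on version B (the rewrite author's own statement) =====
-- stated objective: faster
-- what changed: Replaces the per-element scan of matched_target_components (the 'in' test inside the loop) with a dict that aggregates each component's scores in one pass, then sums lookups over the distinct matched components.
import Mathlib
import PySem

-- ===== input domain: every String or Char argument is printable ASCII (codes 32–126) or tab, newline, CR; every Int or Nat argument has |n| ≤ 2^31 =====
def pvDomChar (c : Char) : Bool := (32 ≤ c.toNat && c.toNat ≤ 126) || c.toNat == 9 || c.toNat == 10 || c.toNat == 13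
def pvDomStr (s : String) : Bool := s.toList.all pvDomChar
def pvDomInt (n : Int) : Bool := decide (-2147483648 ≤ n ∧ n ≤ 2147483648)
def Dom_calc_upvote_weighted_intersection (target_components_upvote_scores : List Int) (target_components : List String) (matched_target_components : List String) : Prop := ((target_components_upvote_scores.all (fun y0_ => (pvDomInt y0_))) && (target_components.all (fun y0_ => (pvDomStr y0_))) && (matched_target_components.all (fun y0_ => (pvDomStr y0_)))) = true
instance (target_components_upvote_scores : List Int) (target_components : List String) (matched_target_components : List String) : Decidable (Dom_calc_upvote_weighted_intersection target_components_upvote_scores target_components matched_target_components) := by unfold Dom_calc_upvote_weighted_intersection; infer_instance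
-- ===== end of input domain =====

-- ===== PORT A =====
-- B replaces the inner membership scan with a one-pass dict of per-component score sums; equivalence is about the return value.
def calc_upvote_weighted_intersection (target_components_upvote_scores : List Int) (target_components : List String) (matched_target_components : List String) : Int :=
  (target_components_upvote_scores.zip target_components).foldl
    (fun score p => if matched_target_components.contains p.2 then score + p.1 else score) 0

-- ===== PORT B =====
def calc_upvote_weighted_intersection_alt (target_components_upvote_scores : List Int) (target_components : List String) (matched_target_components : List String) : Int :=
  let index : PySem.Dict String Int :=
    (target_components_upvote_scores.zip target_components).foldl
      (fun d p => d.modify p.2 0 (· + p.1)) PySem.Dict.empty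
  (PySem.Set.ofList matched_target_components).foldl (fun total comp => total + index.getD comp 0) 0

-- ===== PRECONDITION & SPEC =====
def Spec_calc_upvote_weighted_intersection (target_components_upvote_scores : List Int) (target_components : List String) (matched_target_components : List String) (out : Int) : Prop := out = calc_upvote_weighted_intersection_alt target_components_upvote_scores target_components matched_target_components
instance (target_components_upvote_scores : List Int) (target_components : List String) (matched_target_components : List String) (out : Int) : Decidable (Spec_calc_upvote_weighted_intersection target_components_upvote_scores target_components matched_target_components out) := by unfold Spec_calc_upvote_weighted_intersection; infer_instance

-- ===== CLAIM (what is proved, stated in full; the proofs are below) =====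
def Claim_equal_calc_upvote_weighted_intersection : Prop := ∀ (target_components_upvote_scores : List Int) (target_components : List String) (matched_target_components : List String), Dom_calc_upvote_weighted_intersection target_components_upvote_scores target_components matched_target_components → Spec_calc_upvote_weighted_intersection target_components_upvote_scores target_components matched_target_components (calc_upvote_weighted_intersection target_components_upvote_scores target_components matched_target_components)

-- ===== LEMMAS AND PROOFS =====

-- getD on the accumulation dict = initial value + sum of the scores filed under that key
theorem getD_fold_modify_add (l : List (Int × String)) (d : PySem.Dict String Int) (c : String) :
    (l.foldl (fun d p => d.modify p.2 0 (· + p.1)) d).getD c 0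
      = d.getD c 0 + ((l.filter (fun p => p.2 == c)).map (·.1)).sum := by
  induction l generalizing d with
  | nil => simp
  | cons p t ih =>
    simp only [List.foldl_cons, ih, List.filter_cons, PySem.Dict.getD_modify]
    by_cases h : p.2 = c
    · simp [h]
      ring
    · simp [h, Ne.symm h]

theorem sum_map_if_not_mem (S : List String) (x : String) (v : Int) (h : x ∉ S) :
    (S.map (fun c => if x = c then v else 0)).sum = 0 := by
  induction S with
  | nil => simp
  | cons c T ih =>
    have hxc : x ≠ c := by rintro rfl; exact h (by simp)
    simp [hxc, ih (fun m => h (List.mem_cons_of_mem _ m))]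

-- summing 'if x = c then v else 0' over a Nodup list = v iff x is in the list
theorem sum_map_if_eq (S : List String) (hS : S.Nodup) (x : String) (v : Int) :
    (S.map (fun c => if x = c then v else 0)).sum = if x ∈ S then v else 0 := by
  induction S with
  | nil => simp
  | cons c T ih =>
    rcases List.nodup_cons.mp hS with ⟨hc, hT⟩
    by_cases h : x = c
    · subst h
      simp [sum_map_if_not_mem T x v hc, hc]
    · simp [h, ih hT]

-- summing per-key filtered sums over a Nodup key list = filtering by membership
theorem sum_over_keys (S : List String) (hS : S.Nodup) (l : List (Int × String)) :
    (S.map (fun c => ((l.filter (fun p => p.2 == c)).map (·.1)).sum)).sum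
      = ((l.filter (fun p => S.contains p.2)).map (·.1)).sum := by
  induction l with
  | nil => simp
  | cons p t ih =>
    have hstep : (S.map (fun c => ((List.filter (fun q => q.2 == c) (p :: t)).map (·.1)).sum)).sum
        = (S.map (fun c => (if p.2 = c then p.1 else 0)
            + ((t.filter (fun q => q.2 == c)).map (·.1)).sum)).sum := by
      apply congrArg
      apply List.map_congr_left
      intro c _
      by_cases hc : p.2 = c <;> simp [hc]
    have hsplit : (S.map (fun c => (if p.2 = c then p.1 else 0)
            + ((t.filter (fun q => q.2 == c)).map (·.1)).sum)).sum
        = (S.map (fun c => if p.2 = c then p.1 else (0:Int))).sum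
          + (S.map (fun c => ((t.filter (fun q => q.2 == c)).map (·.1)).sum)).sum := by
      induction S with
      | nil => simp
      | cons a T ihS => simp; ring
    rw [hstep, hsplit, sum_map_if_eq S hS p.2 p.1, ih]
    by_cases h : p.2 ∈ S <;> simp [h]

-- ===== VERDICT (by name: the statement is the Claim_ definition above) =====
theorem calc_upvote_weighted_intersection_spec : Claim_equal_calc_upvote_weighted_intersection := by
  intro scores comps matched _
  unfold Spec_calc_upvote_weighted_intersection
  unfold calc_upvote_weighted_intersection calc_upvote_weighted_intersection_alt
  set l := scores.zip comps with hl
  rw [PySem.List.foldl_if_eq_foldl_filter, PySem.List.foldl_add, PySem.List.foldl_add]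
  have h1 : ∀ c, (l.foldl (fun d p => d.modify p.2 0 (· + p.1)) PySem.Dict.empty).getD c 0
      = ((l.filter (fun p => p.2 == c)).map (·.1)).sum := by
    intro c; rw [getD_fold_modify_add]; simp
  have h2 := sum_over_keys (PySem.Set.ofList matched) (PySem.Set.nodup_ofList matched) l
  have h3 : (l.filter (fun p => List.contains (PySem.Set.ofList matched) p.2))
      = l.filter (fun p => matched.contains p.2) := by
    apply List.filter_congr
    intro p _
    simp [PySem.Set.mem_ofList]
  simp only [List.map_congr_left (fun c _ => h1 c), h2]
  rw [h3]
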